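-- pv_equiv track=rewrite | github.com/NEBULA1978/ejercicios-PY | ejercicio50.py | bucles
-- ===== SOURCE A (Python) =====
-- def bucles(numero):
--     array_numeros = list(str(numero))
--     bucles = 0
--
--     for num in array_numeros:
--         num = int(num)
--
--         if num == 0 or num == 6 or num == 9:
--             bucles += 1
--         elif num == 8:
--             bucles += 2
--
--     return bucles
-- ===== SOURCE B (Python) =====
-- def bucles(numero):
--     # tabulate-then-combine: one conversion pass, a frequency table, a closed-form weighted sum
--     digits = [int(c) for c in str(numero)]
--     counts = {}
--     for d in digits:
--         counts[d] = counts.get(d, 0) + 1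
--     return counts.get(0, 0) + counts.get(6, 0) + counts.get(9, 0) + 2 * counts.get(8, 0)
-- ===== Notes on version B (the rewrite author's own statement) =====
-- stated objective: alternative
-- what changed: B converts all digits in one pass, builds a digit-frequency table, and returns a weighted closed-form combination of the loop-digit frequencies instead of A's per-digit branching accumulator.
import Mathlib
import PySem

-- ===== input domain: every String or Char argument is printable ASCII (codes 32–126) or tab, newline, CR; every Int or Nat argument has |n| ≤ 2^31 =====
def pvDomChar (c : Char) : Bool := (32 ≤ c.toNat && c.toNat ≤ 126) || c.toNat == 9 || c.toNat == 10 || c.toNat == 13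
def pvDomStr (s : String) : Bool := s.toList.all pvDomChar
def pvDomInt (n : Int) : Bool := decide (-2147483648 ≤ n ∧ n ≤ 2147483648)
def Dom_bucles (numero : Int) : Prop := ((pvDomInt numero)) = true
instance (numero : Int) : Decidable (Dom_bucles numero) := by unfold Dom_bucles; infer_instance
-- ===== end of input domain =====

-- B tabulates digit frequencies once and returns a weighted closed-form sum of the loop-digit frequencies instead of A's per-digit branching accumulator (alternative decomposition, same cost).

-- ===== PORT A =====
-- int(c) for a single char; none (ValueError) is unreachable under Pre_, defaulted to 0
def pvInt1 (c : Char) : Int := (PySem.Int.ofChars? [c]).getD 0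

def bucles (numero : Int) : Int :=
  let array_numeros := (PySem.Int.toStr numero).toList
  array_numeros.foldl (fun b c =>
    let num := pvInt1 c
    if num == 0 || num == 6 || num == 9 then b + 1
    else if num == 8 then b + 2
    else b) 0

-- ===== PORT B =====
def bucles_alt (numero : Int) : Int :=
  let digits := (PySem.Int.toStr numero).toList.map pvInt1
  let counts := digits.foldl (fun d k => d.insert k (d.getD k 0 + 1)) PySem.Dict.empty
  counts.getD 0 0 + counts.getD 6 0 + counts.getD 9 0 + 2 * counts.getD 8 0

-- ===== PRECONDITION & SPEC =====
-- Pre_ excludes negative numero: str(numero) then contains '-', on which int('-') raises ValueError in both A and B.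
def Pre_bucles (numero : Int) : Prop := 0 ≤ numero
instance (numero : Int) : Decidable (Pre_bucles numero) := by unfold Pre_bucles; infer_instance
def pvWitness_bucles : Int := 689

def Spec_bucles (numero : Int) (out : Int) : Prop := out = bucles_alt numero
instance (numero : Int) (out : Int) : Decidable (Spec_bucles numero out) := by unfold Spec_bucles; infer_instance

-- ===== CLAIM (what is proved, stated in full; the proofs are below) =====
def Claim_equal_bucles : Prop := ∀ (numero : Int), Dom_bucles numero → Pre_bucles numero → Spec_bucles numero (bucles numero)

-- ===== LEMMAS AND PROOFS =====
theorem bucles_fold_eq (cs : List Char) (b : Int) :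
    cs.foldl (fun b c =>
      let num := pvInt1 c
      if num == 0 || num == 6 || num == 9 then b + 1
      else if num == 8 then b + 2
      else b) b
    = b + ((cs.map pvInt1).count 0 + (cs.map pvInt1).count 6
        + (cs.map pvInt1).count 9 + 2 * ((cs.map pvInt1).count 8 : Int)) := by
  induction cs generalizing b with
  | nil => simp
  | cons c cs ih =>
    simp only [List.foldl_cons, List.map_cons, List.count_cons, ih]
    by_cases h0 : pvInt1 c = 0 <;> by_cases h6 : pvInt1 c = 6 <;>
      by_cases h9 : pvInt1 c = 9 <;> by_cases h8 : pvInt1 c = 8 <;>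
      simp [h0, h6, h9, h8] <;> omega

theorem bucles_alt_eq (numero : Int) :
    bucles_alt numero
    = (((PySem.Int.toStr numero).toList.map pvInt1).count 0 : Int)
      + (((PySem.Int.toStr numero).toList.map pvInt1).count 6 : Int)
      + (((PySem.Int.toStr numero).toList.map pvInt1).count 9 : Int)
      + 2 * (((PySem.Int.toStr numero).toList.map pvInt1).count 8 : Int) := by
  simp only [bucles_alt, PySem.Dict.getD_foldl_insert_add_one, PySem.Dict.getD_empty]
  ring

-- ===== VERDICT (by name: the statement is the Claim_ definition above) =====
theorem bucles_spec : Claim_equal_bucles := by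
  intro numero _ _
  unfold Spec_bucles
  rw [bucles_alt_eq]
  unfold bucles
  rw [bucles_fold_eq]
  ring
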